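-- pv_equiv track=rewrite | github.com/ryaneveson/COSC490FinalProject | 0-D/Phase2/Step6.py | _extract_alpha_tokens
-- ===== SOURCE A (Python) =====
-- from typing import Dict, List, Optional, Set, Tuple
--
-- def _extract_alpha_tokens(text: str) -> List[str]:
--     tokens, cur = [], []
--     for c in text.lower():
--         if c.isalpha():
--             cur.append(c)
--         elif cur:
--             tok = "".join(cur)
--             if len(tok) > 1:
--                 tokens.append(tok)
--             cur = []
--     if cur:
--         tok = "".join(cur)
--         if len(tok) > 1:
--             tokens.append(tok)
--     return tokens
-- ===== SOURCE B (Python) =====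
-- def _extract_alpha_tokens(text):
--     s = text.lower()
--     n = len(s)
--     out = []
--     i = 0
--     while i < n:
--         if s[i].isalpha():
--             j = i + 1
--             while j < n and s[j].isalpha():
--                 j += 1
--             if j - i > 1:
--                 out.append(s[i:j])
--             i = j
--         else:
--             i += 1
--     return out
-- ===== Notes on version B (the rewrite author's own statement) =====
-- stated objective: alternative
-- what changed: Replaces A's character-buffer accumulator with trailing flush by a run scanner: an index loop that finds each maximal alphabetic run with an inner scan and slices it out, so there is no cur buffer and no post-loop flush.
import Mathlib
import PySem

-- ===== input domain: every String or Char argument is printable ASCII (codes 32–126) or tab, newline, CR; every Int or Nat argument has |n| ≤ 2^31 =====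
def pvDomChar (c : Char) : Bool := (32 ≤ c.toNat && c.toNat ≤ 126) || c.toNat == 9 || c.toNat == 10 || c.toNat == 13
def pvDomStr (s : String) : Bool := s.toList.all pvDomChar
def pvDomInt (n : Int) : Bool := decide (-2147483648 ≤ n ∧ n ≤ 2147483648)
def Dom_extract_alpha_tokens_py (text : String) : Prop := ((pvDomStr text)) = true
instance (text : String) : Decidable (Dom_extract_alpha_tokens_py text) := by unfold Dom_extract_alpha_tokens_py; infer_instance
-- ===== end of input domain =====

-- B replaces A's character-buffer accumulator (with trailing flush) by a maximal-run
-- scanner that slices each alphabetic run out directly; same output, alternative structure.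

-- ===== PORT A =====
-- the for-loop of A with its state (tokens, cur), then the trailing flush
def aGo (tokens : List String) (cur : List Char) : List Char → List String
  | [] =>
      if cur ≠ [] then
        (if cur.length > 1 then tokens ++ [String.mk cur] else tokens)
      else tokens
  | c :: rest =>
      if PySem.Chars.isalpha c then aGo tokens (cur ++ [c]) rest
      else if cur ≠ [] then
        aGo (if cur.length > 1 then tokens ++ [String.mk cur] else tokens) [] rest
      else aGo tokens cur rest

def extract_alpha_tokens_py (text : String) : List String :=
  aGo [] [] (PySem.Chars.lower text.toList)

-- ===== PORT B =====
-- B's outer index loop; the inner `while j < n and s[j].isalpha()` scan is the takeWhile,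
-- the slice s[i:j] is the run, a non-alpha position advances by one
def bGo (l : List Char) : List String :=
  match l with
  | [] => []
  | c :: rest =>
      if PySem.Chars.isalpha c then
        let run := c :: rest.takeWhile PySem.Chars.isalpha
        (if run.length > 1 then [String.mk run] else []) ++
          bGo (rest.dropWhile PySem.Chars.isalpha)
      else bGo rest
termination_by l.length
decreasing_by
· exact Nat.lt_succ_of_le (List.length_dropWhile_le _ _)
· simp

def extract_alpha_tokens_py_alt (text : String) : List String :=
  bGo (PySem.Chars.lower text.toList)

-- ===== PRECONDITION & SPEC =====
def Spec_extract_alpha_tokens_py (text : String) (out : List String) : Prop := out = extract_alpha_tokens_py_alt text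
instance (text : String) (out : List String) : Decidable (Spec_extract_alpha_tokens_py text out) := by unfold Spec_extract_alpha_tokens_py; infer_instance

-- ===== CLAIM (what is proved, stated in full; the proofs are below) =====
def Claim_equal_extract_alpha_tokens_py : Prop := ∀ (text : String), Dom_extract_alpha_tokens_py text → Spec_extract_alpha_tokens_py text (extract_alpha_tokens_py text)

-- ===== LEMMAS AND PROOFS =====

-- while cur is nonempty, A consumes the pending alpha run and flushes it
lemma aGo_run (l : List Char) : ∀ (tokens : List String) (cur : List Char), cur ≠ [] →
    aGo tokens cur l =
      aGo (if (cur ++ l.takeWhile PySem.Chars.isalpha).length > 1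
             then tokens ++ [String.mk (cur ++ l.takeWhile PySem.Chars.isalpha)]
             else tokens)
        [] (l.dropWhile PySem.Chars.isalpha) := by
  induction l with
  | nil =>
      intro tokens cur h
      simp [aGo, h]
  | cons c rest ih =>
      intro tokens cur h
      by_cases hc : PySem.Chars.isalpha c
      · rw [show aGo tokens cur (c :: rest) = aGo tokens (cur ++ [c]) rest by
            simp [aGo, hc]]
        rw [ih _ _ (by simp)]
        simp [List.takeWhile, List.dropWhile, hc, List.append_assoc]
      · have h1 : aGo tokens cur (c :: rest) =
            aGo (if cur.length > 1 then tokens ++ [String.mk cur] else tokens) [] rest := by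
          simp [aGo, hc, h]
        have h2 : (c :: rest).takeWhile PySem.Chars.isalpha = [] := by
          simp [List.takeWhile, hc]
        have h3 : (c :: rest).dropWhile PySem.Chars.isalpha = c :: rest := by
          simp [List.dropWhile, hc]
        rw [h1, h2, h3]
        simp [aGo, hc]

lemma aGo_eq_bGo (n : Nat) : ∀ (l : List Char), l.length ≤ n →
    ∀ (tokens : List String), aGo tokens [] l = tokens ++ bGo l := by
  induction n with
  | zero =>
      intro l hl tokens
      have : l = [] := List.eq_nil_of_length_eq_zero (Nat.le_zero.mp hl)
      subst this
      simp [aGo, bGo]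
  | succ n ih =>
      intro l hl tokens
      match l with
      | [] => simp [aGo, bGo]
      | c :: rest =>
        by_cases hc : PySem.Chars.isalpha c
        · have h1 : aGo tokens [] (c :: rest) = aGo tokens [c] rest := by
            simp [aGo, hc]
          rw [h1, aGo_run rest tokens [c] (by simp)]
          have hlen : (rest.dropWhile PySem.Chars.isalpha).length ≤ n := by
            have := List.length_dropWhile_le PySem.Chars.isalpha rest
            simp at hl; omega
          rw [ih _ hlen]
          rw [show bGo (c :: rest) =
              (if (c :: rest.takeWhile PySem.Chars.isalpha).length > 1
                 then [String.mk (c :: rest.takeWhile PySem.Chars.isalpha)] else []) ++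
                bGo (rest.dropWhile PySem.Chars.isalpha) by
            rw [bGo]; simp [hc]]
          simp only [List.singleton_append]
          split <;> simp
        · have h1 : aGo tokens [] (c :: rest) = aGo tokens [] rest := by
            simp [aGo, hc]
          have h2 : bGo (c :: rest) = bGo rest := by rw [bGo]; simp [hc]
          rw [h1, h2]
          exact ih rest (by simp at hl; omega) tokens

-- ===== VERDICT (by name: the statement is the Claim_ definition above) =====
theorem extract_alpha_tokens_py_spec : Claim_equal_extract_alpha_tokens_py := by
  intro text _
  show extract_alpha_tokens_py text = extract_alpha_tokens_py_alt text
  unfold extract_alpha_tokens_py extract_alpha_tokens_py_alt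
  simpa using aGo_eq_bGo _ _ (le_refl _) []
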